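-- pv_equiv track=rewrite | github.com/AddNap/DocQuill | packages/docquill_core/docquill/engine/pdf/pdf_compiler.py | _split_page_indices
-- ===== SOURCE A (Python) =====
-- from typing import Any, Dict, List, Optional, Tuple, Union
--
-- def _split_page_indices(total_pages: int, workers: int) -> List[List[int]]:
--     workers = max(1, min(workers, total_pages))
--     base = total_pages // workers
--     remainder = total_pages % workers
--     result: List[List[int]] = []
--     start = 0
--     for worker in range(workers):
--         extra = 1 if worker < remainder else 0
--         stop = start + base + extra
--         result.append(list(range(start, stop)))
--         start = stop
--     return [chunk for chunk in result if chunk]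
-- ===== SOURCE B (Python) =====
-- from typing import List
--
-- def _split_page_indices(total_pages: int, workers: int) -> List[List[int]]:
--     # Greedy peeling: hand the current worker ceil(n/k) of the n remaining pages,
--     # then continue with k-1 workers; stops when pages or workers run out.
--     k = max(1, min(workers, total_pages))
--     result: List[List[int]] = []
--     start = 0
--     n = total_pages
--     while k > 0 and n > 0:
--         size = -(-n // k)
--         result.append(list(range(start, start + size)))
--         start += size
--         n -= size
--         k -= 1
--     return result
-- ===== Notes on version B (the rewrite author's own statement) =====
-- stated objective: alternative
-- what changed: Replaces A's precomputed base/remainder for-loop with a running start and a final empty-chunk filter by a greedy peeling loop: the current worker takes ceil(n/k) of the n remaining pages and the loop continues with k-1 workers; no div/mod precomputation, no empty chunks, no filter pass.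
import Mathlib
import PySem

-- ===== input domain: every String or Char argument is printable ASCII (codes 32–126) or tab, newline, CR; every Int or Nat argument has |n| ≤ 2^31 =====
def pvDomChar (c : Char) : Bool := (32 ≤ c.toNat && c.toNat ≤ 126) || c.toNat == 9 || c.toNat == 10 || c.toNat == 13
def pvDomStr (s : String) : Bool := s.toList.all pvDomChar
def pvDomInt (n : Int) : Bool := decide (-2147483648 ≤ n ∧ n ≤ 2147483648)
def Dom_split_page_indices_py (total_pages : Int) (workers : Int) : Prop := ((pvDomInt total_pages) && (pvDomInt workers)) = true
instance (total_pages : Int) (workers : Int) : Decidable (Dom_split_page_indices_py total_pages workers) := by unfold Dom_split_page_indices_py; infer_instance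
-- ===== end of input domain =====

-- B replaces A's base/remainder loop (running start + final empty-chunk filter) by a
-- greedy peel: the current worker takes ceil(n/k) of the n remaining pages (objective: alternative, same cost).

-- ===== PORT A =====
def split_page_indices_py (total_pages : Int) (workers : Int) : List (List Int) :=
  let w := max 1 (min workers total_pages)
  let base := PySem.Int.floordiv total_pages w
  let remainder := PySem.Int.mod total_pages w
  let p := (PySem.List.pyRange 0 w 1).foldl
    (fun (acc : List (List Int) × Int) worker =>
      let extra : Int := if worker < remainder then 1 else 0
      let stop := acc.2 + base + extra
      (acc.1 ++ [PySem.List.pyRange acc.2 stop 1], stop))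
    ([], 0)
  p.1.filter (fun chunk => !chunk.isEmpty)

-- ===== PORT B =====
-- the while loop: while k > 0 and n > 0, append ceil(n/k) pages and continue with k-1 workers
def pvGoB (acc : List (List Int)) (start n : Int) : Nat → List (List Int)
  | 0 => acc
  | Nat.succ k =>
    if n ≤ 0 then acc
    else
      let size := -(PySem.Int.floordiv (-n) ((k : Int) + 1))
      pvGoB (acc ++ [PySem.List.pyRange start (start + size) 1]) (start + size) (n - size) k

def split_page_indices_py_alt (total_pages : Int) (workers : Int) : List (List Int) :=
  pvGoB [] 0 total_pages (max 1 (min workers total_pages)).toNat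

-- ===== PRECONDITION & SPEC =====
def Spec_split_page_indices_py (total_pages : Int) (workers : Int) (out : List (List Int)) : Prop := out = split_page_indices_py_alt total_pages workers
instance (total_pages : Int) (workers : Int) (out : List (List Int)) : Decidable (Spec_split_page_indices_py total_pages workers out) := by unfold Spec_split_page_indices_py; infer_instance

-- ===== CLAIM (what is proved, stated in full; the proofs are below) =====
def Claim_equal_split_page_indices_py : Prop := ∀ (total_pages : Int) (workers : Int), Dom_split_page_indices_py total_pages workers → Spec_split_page_indices_py total_pages workers (split_page_indices_py total_pages workers)

-- ===== LEMMAS AND PROOFS =====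

-- A's fold, started at boundary k with accumulated start = k*base + min k r,
-- produces the chunks of the closed-form boundary map for the remaining workers.
theorem pv_loop_eq (base r : Int) (n : Nat) : ∀ (k w : Int) (res : List (List Int)),
    w - k = (n : Int) →
    (PySem.List.pyRange k w 1).foldl
      (fun (acc : List (List Int) × Int) worker =>
        let extra : Int := if worker < r then 1 else 0
        let stop := acc.2 + base + extra
        (acc.1 ++ [PySem.List.pyRange acc.2 stop 1], stop))
      (res, k * base + min k r)
    = (res ++ (PySem.List.pyRange k w 1).map
        (fun i => PySem.List.pyRange (i * base + min i r) ((i + 1) * base + min (i + 1) r) 1),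
       w * base + min w r) := by
  induction n with
  | zero =>
    intro k w res h
    have hkw : w = k := by omega
    subst hkw
    rw [PySem.List.pyRange_one_eq_nil le_rfl]
    simp
  | succ m ih =>
    intro k w res h
    have hkw : k < w := by omega
    rw [PySem.List.pyRange_one_cons hkw]
    simp only [List.foldl_cons, List.map_cons]
    have hb : k * base + min k r + base + (if k < r then 1 else 0)
        = (k + 1) * base + min (k + 1) r := by
      by_cases hk : k < r <;> simp [hk] <;> ring_nf <;> omega
    rw [hb]
    rw [ih (k + 1) w (res ++ [PySem.List.pyRange (k * base + min k r) ((k + 1) * base + min (k + 1) r) 1]) (by omega)]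
    simp

-- B's greedy recursion, started at boundary k, produces the same closed-form boundary map.
theorem pvGoB_eq (q r : Int) (hq : 1 ≤ q) (hr0 : 0 ≤ r) (m : Nat) : ∀ (k : Int) (acc : List (List Int)), 0 ≤ k →
    (0 < m → r < k + m) →
    pvGoB acc (k * q + min k r) ((k + m) * q + r - (k * q + min k r)) m
    = acc ++ (PySem.List.pyRange k (k + m) 1).map
        (fun i => PySem.List.pyRange (i * q + min i r) ((i + 1) * q + min (i + 1) r) 1) := by
  induction m with
  | zero =>
    intro k acc _ _
    rw [PySem.List.pyRange_one_eq_nil (by omega)]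
    simp [pvGoB]
  | succ m ih =>
    intro k acc hk hrm
    have hrlt : r < k + (m + 1 : Nat) := hrm (Nat.succ_pos m)
    have hmink : min k r ≤ r := min_le_right _ _
    have hmink0 : 0 ≤ min k r := le_min hk hr0
    set n : Int := (k + (m + 1 : Nat)) * q + r - (k * q + min k r) with hn
    have hr' : 0 ≤ r - min k r ∧ r - min k r < (m : Int) + 1 := by
      constructor
      · omega
      · by_cases h : k ≤ r
        · have : min k r = k := min_eq_left h
          push_cast at hrlt; omega
        · have : min k r = r := min_eq_right (by omega)
          omega
    have hneq : n = ((m : Int) + 1) * q + (r - min k r) := by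
      push_cast [hn]; ring
    have hnpos : 0 < n := by nlinarith [hr'.1, hr'.2]
    have hsize : -(PySem.Int.floordiv (-n) ((m : Int) + 1))
        = q + (if k < r then 1 else 0) := by
      rw [PySem.Int.neg_floordiv_neg_eq_iff_of_pos (by positivity)]
      by_cases hk' : k < r
      · have hminkk : min k r = k := min_eq_left (by omega)
        simp only [hk', if_true]
        constructor <;> nlinarith [hr'.1, hr'.2, hneq, hminkk]
      · have hminkr : min k r = r := min_eq_right (by omega)
        simp only [hk', if_false]
        constructor <;> nlinarith [hneq, hminkr]
    have hbound : k * q + min k r + (q + (if k < r then 1 else 0))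
        = (k + 1) * q + min (k + 1) r := by
      by_cases hk' : k < r <;> simp [hk'] <;> ring_nf <;> omega
    show pvGoB acc (k * q + min k r) n (m + 1) = _
    rw [pvGoB]
    rw [if_neg (by omega)]
    simp only [hsize, hbound]
    have hrec : n - (q + (if k < r then 1 else 0))
        = ((k + 1) + (m : Nat)) * q + r - ((k + 1) * q + min (k + 1) r) := by
      have := hbound
      push_cast [hn] at this ⊢; ring_nf at this ⊢; omega
    rw [hrec]
    rw [ih (k + 1) (acc ++ [PySem.List.pyRange (k * q + min k r) ((k + 1) * q + min (k + 1) r) 1]) (by omega) (fun hm => by push_cast at hrlt ⊢; omega)]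
    have hcons : PySem.List.pyRange k (k + (m + 1 : Nat)) 1
        = k :: PySem.List.pyRange (k + 1) ((k + 1) + (m : Nat)) 1 := by
      rw [PySem.List.pyRange_one_cons (by push_cast; omega)]
      congr 1
      push_cast; ring_nf
    rw [hcons, List.map_cons]
    simp

-- ===== VERDICT (by name: the statement is the Claim_ definition above) =====
theorem split_page_indices_py_spec : Claim_equal_split_page_indices_py := by
  intro total_pages workers _
  unfold Spec_split_page_indices_py split_page_indices_py split_page_indices_py_alt
  simp only []
  set w := max 1 (min workers total_pages) with hw
  have hwpos : 0 < w := by positivity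
  by_cases htp : total_pages ≤ 0
  · -- total_pages ≤ 0 : w = 1, A's single chunk is empty and filtered away; B returns [] at once.
    have hw1 : w = 1 := by
      rw [hw]; omega
    rw [hw1]
    have h1 : PySem.List.pyRange 0 1 1 = [0] := by decide
    have hfd : PySem.Int.floordiv total_pages 1 = total_pages := by
      rw [PySem.Int.floordiv_eq_ediv_of_pos (by omega)]; omega
    rw [h1]
    simp only [List.foldl_cons, List.foldl_nil, hfd]
    rw [PySem.List.pyRange_one_eq_nil (by simp; omega)]
    have hto : (1 : Int).toNat = 1 := by decide
    rw [hto]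
    simp [pvGoB, htp]
  · -- total_pages ≥ 1 : both equal the closed-form boundary map; every chunk is non-empty.
    push Not at htp
    have hwle : w ≤ total_pages := by rw [hw]; omega
    set q := PySem.Int.floordiv total_pages w with hqdef
    set r := PySem.Int.mod total_pages w with hrdef
    have hsum : q * w + r = total_pages := PySem.Int.floordiv_mul_add_mod total_pages w
    have hr0 : 0 ≤ r := PySem.Int.mod_nonneg total_pages hwpos
    have hrw : r < w := PySem.Int.mod_lt total_pages hwpos
    have hsum' : w * q + r = total_pages := by rw [mul_comm]; exact hsum
    have hq1 : 1 ≤ q := by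
      rw [hqdef, PySem.Int.le_floordiv_iff_mul_le hwpos]; omega
    -- A side: replace the fold by the boundary map, via pv_loop_eq.
    have h0 : (([], 0) : List (List Int) × Int)
        = (([] : List (List Int)), 0 * q + min 0 r) := by
      simp [min_eq_left hr0]
    rw [h0, pv_loop_eq q r w.toNat 0 w [] (by omega)]
    simp only [List.nil_append]
    -- B side: replace the recursion by the same map, via pvGoB_eq.
    have hB : pvGoB [] 0 total_pages w.toNat
        = (PySem.List.pyRange 0 w 1).map
            (fun i => PySem.List.pyRange (i * q + min i r) ((i + 1) * q + min (i + 1) r) 1) := by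
      have hcastw : ((w.toNat : Nat) : Int) = w := Int.toNat_of_nonneg (by omega)
      have := pvGoB_eq q r hq1 hr0 w.toNat 0 [] le_rfl (fun _ => by rw [hcastw]; omega)
      rw [hcastw] at this
      simpa [min_eq_left hr0, hsum'] using this
    rw [hB]
    -- the filter removes nothing: every chunk has length q + extra ≥ 1
    apply List.filter_eq_self.mpr
    intro chunk hchunk
    obtain ⟨i, hi, rfl⟩ := List.mem_map.mp hchunk
    have hi' : 0 ≤ i ∧ i < w := (PySem.List.mem_pyRange_one).mp hi
    have hlt : i * q + min i r < (i + 1) * q + min (i + 1) r := by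
      have : min i r ≤ min (i + 1) r := by
        by_cases h : i ≤ r <;> by_cases h' : i + 1 ≤ r <;> omega
      nlinarith
    have hne : PySem.List.pyRange (i * q + min i r) ((i + 1) * q + min (i + 1) r) 1 ≠ [] := by
      intro h
      have hl := congrArg List.length h
      rw [PySem.List.length_pyRange_one] at hl
      simp at hl
      omega
    simp [hne]
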